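-- pv_equiv track=rewrite | github.com/piotrhelm/NESTFUL | data_v2/executable_functions/py_code_file_1466.py | find_first_substring
-- ===== SOURCE A (Python) =====
-- def find_first_substring(string: str, substring: str) -> int:
--
--     """Finds the first occurrence of a substring within a string.
--
--
--
--     Args:
--
--         string: The string to search within.
--
--         substring: The substring to search for.
--
--
--
--     Returns:
--
--         The index of the first occurrence of the substring, or -1 if the substring is not found.
--
--     """
--
--     if not string or not substring or len(substring) > len(string):
--
--         return -1
--
--
--
--     for i in range(len(string)):
--
--         if string[i] == substring[0]:
--
--             for j in range(len(substring)):
--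
--                 if i + j >= len(string) or string[i + j] != substring[j]:
--
--                     break
--
--             else:
--
--                 return i
--
--     return -1
-- ===== SOURCE B (Python) =====
-- def find_first_substring(string: str, substring: str) -> int:
--     # delegate to the built-in search; A returns -1 for an empty substring
--     if not substring:
--         return -1
--     return string.find(substring)
-- ===== Notes on version B (the rewrite author's own statement) =====
-- stated objective: idiomatic
-- what changed: Replaces A's hand-written character-by-character double loop with Python's built-in str.find (C-implemented two-way search), keeping only the empty-substring guard.
import Mathlib
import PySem

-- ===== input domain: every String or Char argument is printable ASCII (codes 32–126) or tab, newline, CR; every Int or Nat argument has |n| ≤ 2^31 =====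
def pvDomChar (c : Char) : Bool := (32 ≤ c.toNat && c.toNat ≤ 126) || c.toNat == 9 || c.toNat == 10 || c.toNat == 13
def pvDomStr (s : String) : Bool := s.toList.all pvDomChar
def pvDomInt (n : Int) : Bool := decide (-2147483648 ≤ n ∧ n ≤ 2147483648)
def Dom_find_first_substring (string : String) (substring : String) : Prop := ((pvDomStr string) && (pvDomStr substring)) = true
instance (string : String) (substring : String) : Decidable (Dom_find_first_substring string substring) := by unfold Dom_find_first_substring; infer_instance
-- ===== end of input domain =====

-- B replaces A's hand-written double loop with the built-in substring search (str.find),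
-- keeping A's empty-substring guard; same return value everywhere.

-- ===== PORT A =====
-- inner 'for j in range(len(substring))' loop with its break/else: returns true iff it runs to completion
def pvInnerA (s p : List Char) (i : Nat) (j : Nat) : Bool :=
  if j < p.length then
    if s.length ≤ i + j ∨ ¬ (s.getD (i + j) ' ' = p.getD j ' ') then false
    else pvInnerA s p i (j + 1)
  else true
termination_by p.length - j

-- outer 'for i in range(len(string))' loop with its early return
def pvOuterA (s p : List Char) (i : Nat) : Int :=
  if i < s.length then
    if s.getD i ' ' = p.getD 0 ' ' then
      if pvInnerA s p i 0 then (i : Int) else pvOuterA s p (i + 1)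
    else pvOuterA s p (i + 1)
  else -1
termination_by s.length - i

def find_first_substring (string : String) (substring : String) : Int :=
  let s := string.toList
  let p := substring.toList
  if s = [] ∨ p = [] ∨ s.length < p.length then -1
  else pvOuterA s p 0

-- ===== PORT B =====
def find_first_substring_alt (string : String) (substring : String) : Int :=
  if substring = "" then -1
  else PySem.Str.find string substring

-- ===== PRECONDITION & SPEC =====
def Spec_find_first_substring (string : String) (substring : String) (out : Int) : Prop := out = find_first_substring_alt string substring
instance (string : String) (substring : String) (out : Int) : Decidable (Spec_find_first_substring string substring out) := by unfold Spec_find_first_substring; infer_instance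

-- ===== CLAIM (what is proved, stated in full; the proofs are below) =====
def Claim_equal_find_first_substring : Prop := ∀ (string : String) (substring : String), Dom_find_first_substring string substring → Spec_find_first_substring string substring (find_first_substring string substring)

-- ===== LEMMAS AND PROOFS =====

-- the inner loop decides "p.drop j is a prefix of s.drop (i+j)"
theorem pvInnerA_iff (s p : List Char) (i j : Nat) :
    pvInnerA s p i j = true ↔ p.drop j <+: s.drop (i + j) := by
  induction hn : p.length - j using Nat.strong_induction_on generalizing j with
  | _ n ih =>
  conv_lhs => rw [pvInnerA]
  by_cases hj : j < p.length
  · rw [if_pos hj]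
    have hpd : p.drop j = p[j] :: p.drop (j + 1) := (List.getElem_cons_drop hj).symm
    by_cases hs : s.length ≤ i + j
    · have hnil : s.drop (i + j) = [] := List.drop_eq_nil_of_le hs
      rw [if_pos (Or.inl hs)]
      constructor
      · intro h; exact absurd h (by simp)
      · intro h
        rw [hnil] at h
        have hdj := List.prefix_nil.mp h
        rw [List.drop_eq_nil_iff] at hdj
        omega
    · have hslt : i + j < s.length := by omega
      have hsd : s.drop (i + j) = s[i + j] :: s.drop (i + j + 1) := (List.getElem_cons_drop hslt).symm
      by_cases heq : s.getD (i + j) ' ' = p.getD j ' '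
      · have h1 : s.getD (i + j) ' ' = s[i + j] := List.getD_eq_getElem _ _ hslt
        have h2 : p.getD j ' ' = p[j] := List.getD_eq_getElem _ _ hj
        have hih := ih (p.length - (j + 1)) (by omega) (j + 1) rfl
        rw [if_neg (by simp only [not_or, not_not]; exact ⟨by omega, heq⟩ :
          ¬ (s.length ≤ i + j ∨ ¬ s.getD (i + j) ' ' = p.getD j ' '))]
        rw [hpd, hsd]
        rw [show i + (j + 1) = i + j + 1 by omega] at hih
        constructor
        · intro h
          exact List.cons_prefix_cons.mpr ⟨by rw [← h1, ← h2, heq], hih.mp h⟩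
        · intro h
          obtain ⟨-, htail⟩ := List.cons_prefix_cons.mp h
          exact hih.mpr htail
      · rw [if_pos (Or.inr heq), hpd, hsd]
        constructor
        · intro h; exact absurd h (by simp)
        · intro h
          obtain ⟨hh, -⟩ := List.cons_prefix_cons.mp h
          exact absurd (by rw [List.getD_eq_getElem _ _ hslt, List.getD_eq_getElem _ _ hj, hh]) heq
  · have hd : p.drop j = [] := List.drop_eq_nil_of_le (by omega)
    rw [if_neg hj, hd]
    simp

-- the combined per-index test of A (first-char check then inner loop) decides "p <+: s.drop i"
theorem pvMatch_iff (s p : List Char) (i : Nat) (hp : p ≠ []) (hi : i < s.length) :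
    ((s.getD i ' ' = p.getD 0 ' ') ∧ pvInnerA s p i 0 = true) ↔ p <+: s.drop i := by
  have hinner := pvInnerA_iff s p i 0
  simp only [List.drop_zero, Nat.add_zero] at hinner
  constructor
  · intro ⟨_, h⟩; exact hinner.mp h
  · intro h
    obtain ⟨p0, pt, rfl⟩ := List.exists_cons_of_ne_nil hp
    have hsd : s.drop i = s[i] :: s.drop (i + 1) := (List.getElem_cons_drop hi).symm
    rw [hsd] at h
    obtain ⟨hh, -⟩ := List.cons_prefix_cons.mp h
    refine ⟨?_, hinner.mpr (hsd ▸ h)⟩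
    rw [List.getD_eq_getElem _ _ hi, hh]; rfl

theorem pvOuterA_step (s p : List Char) (i : Nat) (hp : p ≠ []) (hi : i < s.length)
    (hno : ¬ p <+: s.drop i) : pvOuterA s p i = pvOuterA s p (i + 1) := by
  conv_lhs => rw [pvOuterA]
  rw [if_pos hi]
  by_cases hc : s.getD i ' ' = p.getD 0 ' '
  · have hin : pvInnerA s p i 0 = false := by
      by_contra hne
      exact hno ((pvMatch_iff s p i hp hi).mp ⟨hc, by simpa using hne⟩)
    rw [if_pos hc, hin]
    simp
  · rw [if_neg hc]

theorem pvOuterA_none (s p : List Char) (i : Nat) (hp : p ≠ [])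
    (h : ∀ k, i ≤ k → ¬ p <+: s.drop k) : pvOuterA s p i = -1 := by
  induction hn : s.length - i using Nat.strong_induction_on generalizing i with
  | _ n ih =>
  by_cases hi : i < s.length
  · rw [pvOuterA_step s p i hp hi (h i le_rfl)]
    exact ih (s.length - (i + 1)) (by omega) (i + 1) (fun k hk => h k (by omega)) rfl
  · rw [pvOuterA, if_neg hi]

theorem pvOuterA_found (s p : List Char) (i m : Nat) (hp : p ≠ []) (him : i ≤ m)
    (hm : p <+: s.drop m) (hmin : ∀ k, i ≤ k → k < m → ¬ p <+: s.drop k) :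
    pvOuterA s p i = (m : Int) := by
  have hmlen : m < s.length := by
    by_contra hge
    rw [List.drop_eq_nil_of_le (by omega)] at hm
    exact hp (List.prefix_nil.mp hm)
  induction hn : m - i using Nat.strong_induction_on generalizing i with
  | _ n ih =>
  by_cases heqm : i = m
  · subst heqm
    obtain ⟨hc, hin⟩ := (pvMatch_iff s p i hp hmlen).mpr hm
    conv_lhs => rw [pvOuterA]
    rw [if_pos hmlen, if_pos hc, if_pos hin]
  · rw [pvOuterA_step s p i hp (by omega) (hmin i le_rfl (by omega))]
    exact ih (m - (i + 1)) (by omega) (i + 1) (by omega) (fun k hk1 hk2 => hmin k (by omega) hk2) rfl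

theorem pvNoPrefix_of_notInfix (s p : List Char) (h : ¬ p <:+: s) (k : Nat) :
    ¬ p <+: s.drop k := fun hk => h (hk.isInfix.trans (List.drop_suffix k s).isInfix)

-- ===== VERDICT (by name: the statement is the Claim_ definition above) =====
theorem find_first_substring_spec : Claim_equal_find_first_substring := by
  intro string substring _
  unfold Spec_find_first_substring find_first_substring find_first_substring_alt
  simp only [PySem.Str.find_eq]
  have hsubeq : (substring = "") ↔ (substring.toList = []) := String.toList_eq_nil_iff.symm
  by_cases hp : substring.toList = []
  · rw [if_pos (hsubeq.mpr hp), if_pos (Or.inr (Or.inl hp))]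
  · rw [if_neg (hsubeq.not.mpr hp)]
    by_cases hguard : string.toList = [] ∨ substring.toList = [] ∨ string.toList.length < substring.toList.length
    · rw [if_pos hguard]
      have hninf : ¬ substring.toList <:+: string.toList := by
        rcases hguard with h | h | h
        · rw [h]; intro hinf; exact hp (List.infix_nil.mp hinf)
        · exact absurd h hp
        · intro hinf; exact absurd hinf.length_le (by omega)
      exact ((PySem.Chars.find_eq_neg_one_iff _ _).mpr hninf).symm
    · rw [if_neg hguard]
      have hF := PySem.Chars.neg_one_le_find string.toList substring.toList
      rcases (by omega : PySem.Chars.find string.toList substring.toList = -1 ∨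
          0 ≤ PySem.Chars.find string.toList substring.toList) with hF1 | hF0
      · rw [hF1]
        have hninf := (PySem.Chars.find_eq_neg_one_iff _ _).mp hF1
        exact pvOuterA_none _ _ 0 hp (fun k _ => pvNoPrefix_of_notInfix _ _ hninf k)
      · obtain ⟨hpre, hmin⟩ := PySem.Chars.find_spec hF0
        rw [pvOuterA_found _ _ 0 (PySem.Chars.find string.toList substring.toList).toNat hp
          (Nat.zero_le _) hpre (fun k _ hk => hmin k hk)]
        omega
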